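-- pv_equiv track=rewrite | github.com/Code-Partners/smartinspect-python-library | src/smartinspect/common/context/tableviewercontext.py | __escape_csv_entry
-- ===== SOURCE A (Python) =====
-- def __escape_csv_entry(entry: str) -> str:
--     if len(entry) == 0:
--         return entry
--
--     result = ["\""]
--
--     for letter in entry:
--         if letter.isspace():
--             # Newline characters need to be escaped,
--             # they would break the csv format.
--             result.append(" ")
--         elif letter == '"':
--             # '"' characters are used to surround entries
--             # in the csv format, so they need to be escaped.
--             result.append("\"\"")
--         else:
--             # This character is valid, so just append it.
--             result.append(letter)
--
--     result.append("\"")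
--     return "".join(result)
-- ===== SOURCE B (Python) =====
-- def __escape_csv_entry(entry: str) -> str:
--     if not entry:
--         return entry
--     parts = entry.split('"')
--     body = '""'.join(''.join(' ' if c.isspace() else c for c in p) for p in parts)
--     return '"' + body + '"'
-- ===== Notes on version B (the rewrite author's own statement) =====
-- stated objective: alternative
-- what changed: Instead of a single char-by-char loop with a three-way branch, B splits the string on the quote character into quote-free segments, flattens whitespace inside each segment, and rejoins the segments with a doubled-quote separator, so the per-character quote branch disappears.
import Mathlib
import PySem

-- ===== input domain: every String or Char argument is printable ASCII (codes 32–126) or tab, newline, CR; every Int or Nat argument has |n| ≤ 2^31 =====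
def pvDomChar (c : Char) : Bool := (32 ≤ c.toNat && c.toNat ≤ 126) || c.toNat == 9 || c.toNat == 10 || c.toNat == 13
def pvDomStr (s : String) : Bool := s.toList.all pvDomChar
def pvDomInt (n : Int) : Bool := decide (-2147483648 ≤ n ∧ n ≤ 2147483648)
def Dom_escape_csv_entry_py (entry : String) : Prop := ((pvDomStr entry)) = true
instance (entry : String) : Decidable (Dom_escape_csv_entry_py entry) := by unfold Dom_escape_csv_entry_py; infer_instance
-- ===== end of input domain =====

-- B splits the entry into quote-free segments (str.split('"')), flattens whitespace per
-- segment, and rejoins with the '""' separator — A's per-character three-way branch is gone.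


-- ===== PORT A =====
-- literal port: the result list of one/two-char strings is modelled as a growing List Char
def escape_csv_entry_py (entry : String) : String :=
  if PySem.Str.len entry = 0 then entry
  else
    let result : List Char :=
      entry.toList.foldl (fun acc letter =>
        if PySem.Chars.isspace letter then acc ++ [' ']
        else if letter = '"' then acc ++ ['"', '"']
        else acc ++ [letter]) ['"']
    String.mk (result ++ ['"'])

-- ===== PORT B =====
def escape_csv_entry_py_alt (entry : String) : String :=
  if PySem.Str.len entry = 0 then entry
  else
    let parts := PySem.Chars.splitOn entry.toList ['"']
    let body := PySem.Chars.join ['"', '"']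
      (parts.map (List.map (fun c => if PySem.Chars.isspace c then ' ' else c)))
    String.mk ('"' :: body ++ ['"'])

-- ===== PRECONDITION & SPEC =====
def Spec_escape_csv_entry_py (entry : String) (out : String) : Prop := out = escape_csv_entry_py_alt entry
instance (entry : String) (out : String) : Decidable (Spec_escape_csv_entry_py entry out) := by unfold Spec_escape_csv_entry_py; infer_instance

-- ===== CLAIM (what is proved, stated in full; the proofs are below) =====
def Claim_equal_escape_csv_entry_py : Prop := ∀ (entry : String), Dom_escape_csv_entry_py entry → Spec_escape_csv_entry_py entry (escape_csv_entry_py entry)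

-- ===== LEMMAS AND PROOFS =====

-- simple structural splitter on '"' used only to characterise PySem.Chars.splitOn
def splitQ : List Char → List Char → List (List Char)
  | [], cur => [cur.reverse]
  | c :: rest, cur => if c = '"' then cur.reverse :: splitQ rest [] else splitQ rest (c :: cur)

theorem splitQ_ne_nil (l cur : List Char) : splitQ l cur ≠ [] := by
  cases l with
  | nil => simp [splitQ]
  | cons c rest => by_cases h : c = '"' <;> simp [splitQ, h, splitQ_ne_nil rest]

theorem splitOn_go_eq (l : List Char) : ∀ (fuel : Nat) (cur : List Char) (acc : List (List Char)),
    l.length ≤ fuel →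
    PySem.Chars.splitOn.go ['"'] fuel l cur acc = acc.reverse ++ splitQ l cur := by
  induction l with
  | nil =>
    intro fuel cur acc _
    cases fuel <;> simp [PySem.Chars.splitOn.go, splitQ]
  | cons c rest ih =>
    intro fuel cur acc hf
    cases fuel with
    | zero => simp at hf
    | succ n =>
      rw [PySem.Chars.splitOn.go]
      by_cases h : c = '"'
      · subst h
        simp only [List.isPrefixOf, BEq.rfl, Bool.true_and, if_pos]
        rw [show List.drop (List.length ['"']) ('"' :: rest) = rest from rfl]
        rw [ih n [] (cur.reverse :: acc) (by simpa using Nat.le_of_succ_le_succ hf)]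
        simp [splitQ]
      · have hp : List.isPrefixOf ['"'] (c :: rest) = false := by
          simp [List.isPrefixOf]; exact fun h' => h h'.symm
        simp only [hp, Bool.false_eq_true, if_false]
        rw [ih n (c :: cur) acc (by simpa using Nat.le_of_succ_le_succ hf)]
        simp [splitQ, h]

theorem splitOn_eq_splitQ (l : List Char) : PySem.Chars.splitOn l ['"'] = splitQ l [] := by
  show PySem.Chars.splitOn.go ['"'] (l.length + 1) l [] [] = _
  simpa using splitOn_go_eq l (l.length + 1) [] [] (Nat.le_succ _)

-- the whitespace-flattening character map
def mw (c : Char) : Char := if PySem.Chars.isspace c then ' ' else c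

theorem join_splitQ (l : List Char) : ∀ cur : List Char,
    PySem.Chars.join ['"', '"'] ((splitQ l cur).map (List.map mw)) =
      cur.reverse.map mw ++
        l.flatMap (fun c =>
          if PySem.Chars.isspace c then [' ']
          else if c = '"' then ['"', '"'] else [c]) := by
  induction l with
  | nil => intro cur; simp [splitQ, PySem.Chars.join_singleton]
  | cons c rest ih =>
    intro cur
    by_cases h : c = '"'
    · subst h
      obtain ⟨a, t, ht⟩ : ∃ a t, splitQ rest [] = a :: t := by
        cases hs : splitQ rest [] with
        | nil => exact absurd hs (splitQ_ne_nil rest [])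
        | cons a t => exact ⟨a, t, rfl⟩
      have hthis := ih []
      rw [ht, List.map_cons] at hthis
      rw [show splitQ ('"' :: rest) cur = cur.reverse :: splitQ rest [] from by simp [splitQ]]
      rw [ht, List.map_cons, List.map_cons, PySem.Chars.join_cons_cons, hthis]
      have hws : PySem.Chars.isspace '"' = false := by decide
      simp [hws, List.flatMap_cons]
    · have hm : mw c = if PySem.Chars.isspace c then ' ' else c := rfl
      simp only [splitQ, h, if_false]
      rw [ih (c :: cur)]
      by_cases hs : PySem.Chars.isspace c <;>
        simp [List.flatMap_cons, h, hs, mw]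

-- ===== VERDICT (by name: the statement is the Claim_ definition above) =====
theorem escape_csv_entry_py_spec : Claim_equal_escape_csv_entry_py := by
  intro entry _
  show escape_csv_entry_py entry = escape_csv_entry_py_alt entry
  unfold escape_csv_entry_py escape_csv_entry_py_alt
  by_cases h : PySem.Str.len entry = 0
  · rw [if_pos h, if_pos h]
  · rw [if_neg h, if_neg h]
    have hfun : (fun (acc : List Char) letter =>
        if PySem.Chars.isspace letter then acc ++ [' ']
        else if letter = '"' then acc ++ ['"', '"'] else acc ++ [letter]) =
        (fun acc letter => acc ++
          (if PySem.Chars.isspace letter then [' ']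
           else if letter = '"' then ['"', '"'] else [letter])) := by
      funext acc c; split_ifs <;> rfl
    show String.mk _ = String.mk _
    rw [hfun, PySem.List.foldl_append_eq_flatMap, splitOn_eq_splitQ]
    have := join_splitQ entry.toList []
    simp only [List.reverse_nil, List.map_nil, List.nil_append] at this
    simp only [show (fun c => if PySem.Chars.isspace c then ' ' else c) = mw from rfl, ← this]
    simp
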